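-- pv_equiv track=rewrite | github.com/yhl-amd/ATOM | atom/utils/debug_helper/compare.py | pick_prefill_call
-- ===== SOURCE A (Python) =====
-- from typing import Optional
--
-- def is_pow2(n: int) -> bool:
--     return n > 0 and (n & (n - 1)) == 0
--
-- def pick_prefill_call(
--     calls: list[tuple[int, str, int]], n_slots: int
-- ) -> Optional[tuple[int, str, int]]:
--     """Pick the real-prefill call from a list of (call_idx, path, n_tok).
--
--     Heuristic (matches ATOM model_runner behavior):
--       1. n_tok % n_slots == 0           — full prefill spans all slots
--       2. n_tok > n_slots                — not a per-seq decode (1 tok/seq)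
--       3. not power-of-2 if possible     — warmup uses pow-of-2 dummy sizes
--       4. lowest call index among ties   — earliest matching call
--
--     Returns None if no candidate matches.
--     """
--     cands = [(c, f, n) for (c, f, n) in calls if n % n_slots == 0 and n > n_slots]
--     if not cands:
--         return None
--     non_pow2 = [(c, f, n) for (c, f, n) in cands if not is_pow2(n)]
--     chosen_pool = non_pow2 or cands
--     chosen_pool.sort(key=lambda x: x[0])
--     return chosen_pool[0]
-- ===== SOURCE B (Python) =====
-- def is_pow2(n: int) -> bool:
--     return n > 0 and (n & (n - 1)) == 0
--
-- def pick_prefill_call(calls, n_slots):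
--     best_valid = None
--     best_nonpow2 = None
--     for (c, f, n) in calls:
--         if n % n_slots == 0 and n > n_slots:
--             if best_valid is None or c < best_valid[0]:
--                 best_valid = (c, f, n)
--             if not is_pow2(n) and (best_nonpow2 is None or c < best_nonpow2[0]):
--                 best_nonpow2 = (c, f, n)
--     return best_nonpow2 if best_nonpow2 is not None else best_valid
-- ===== Notes on version B (the rewrite author's own statement) =====
-- stated objective: alternative
-- what changed: Replaced A's build-two-filtered-lists-then-stable-sort-and-take-head pipeline by a single pass over calls maintaining two running earliest candidates (best valid, best valid-and-non-pow2) and selecting the non-pow2 tracker first.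
import Mathlib
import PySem

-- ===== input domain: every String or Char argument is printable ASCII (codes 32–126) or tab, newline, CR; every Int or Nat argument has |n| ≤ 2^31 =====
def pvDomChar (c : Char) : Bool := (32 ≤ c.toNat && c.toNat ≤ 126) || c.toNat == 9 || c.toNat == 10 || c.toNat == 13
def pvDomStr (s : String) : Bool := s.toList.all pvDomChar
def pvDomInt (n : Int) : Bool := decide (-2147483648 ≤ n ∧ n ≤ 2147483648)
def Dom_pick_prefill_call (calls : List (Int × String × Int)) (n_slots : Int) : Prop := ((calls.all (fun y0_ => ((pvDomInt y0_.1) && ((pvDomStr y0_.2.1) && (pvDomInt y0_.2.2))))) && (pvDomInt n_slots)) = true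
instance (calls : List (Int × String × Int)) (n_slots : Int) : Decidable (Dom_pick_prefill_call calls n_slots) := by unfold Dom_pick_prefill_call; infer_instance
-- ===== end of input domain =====

-- B replaces A's filter/filter/stable-sort/head pipeline by one pass over `calls`
-- keeping two running earliest candidates (alternative decomposition, same results).


-- ===== PORT A =====
-- is_pow2(n): n > 0 and (n & (n - 1)) == 0  (exact: for n > 0 both operands of & are
-- nonnegative, where Int.land agrees with Python's &; for n ≤ 0 the `and` short-circuits)
def is_pow2 (n : Int) : Bool := decide (0 < n) && (Int.land n (n - 1) == 0)

def pick_prefill_call (calls : List (Int × String × Int)) (n_slots : Int) : Option (Int × String × Int) :=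
  let cands := calls.filter (fun x => PySem.Int.mod x.2.2 n_slots == 0 && decide (n_slots < x.2.2))
  if cands = [] then none
  else
    let non_pow2 := cands.filter (fun x => !is_pow2 x.2.2)
    let chosen_pool := if non_pow2 = [] then cands else non_pow2
    PySem.List.pyGet? (PySem.List.sorted chosen_pool (fun x => x.1) false) 0

-- ===== PORT B =====
-- one pass: state = (best_valid, best_nonpow2), each an Option, updated with strict `<` on the call index
def pick_prefill_call_alt (calls : List (Int × String × Int)) (n_slots : Int) : Option (Int × String × Int) :=
  let st := calls.foldl (fun (s : Option (Int × String × Int) × Option (Int × String × Int)) x =>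
    if PySem.Int.mod x.2.2 n_slots == 0 && decide (n_slots < x.2.2) then
      (match s.1 with
       | none => some x
       | some m => if x.1 < m.1 then some x else some m,
       if !is_pow2 x.2.2 then
         match s.2 with
         | none => some x
         | some m => if x.1 < m.1 then some x else some m
       else s.2)
    else s) (none, none)
  match st.2 with
  | some v => some v
  | none => st.1

-- ===== PRECONDITION & SPEC =====
-- Pre_ excludes exactly nonempty calls with n_slots = 0, where Python A raises ZeroDivisionError on the first `n % n_slots`.
def Pre_pick_prefill_call (calls : List (Int × String × Int)) (n_slots : Int) : Prop := calls = [] ∨ n_slots ≠ 0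
instance (calls : List (Int × String × Int)) (n_slots : Int) : Decidable (Pre_pick_prefill_call calls n_slots) := by unfold Pre_pick_prefill_call; infer_instance
def pvWitness_pick_prefill_call : (List (Int × String × Int)) × Int := ([(3, "a", 12), (1, "b", 8)], 4)

def Spec_pick_prefill_call (calls : List (Int × String × Int)) (n_slots : Int) (out : Option (Int × String × Int)) : Prop := out = pick_prefill_call_alt calls n_slots
instance (calls : List (Int × String × Int)) (n_slots : Int) (out : Option (Int × String × Int)) : Decidable (Spec_pick_prefill_call calls n_slots out) := by unfold Spec_pick_prefill_call; infer_instance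

-- ===== CLAIM (what is proved, stated in full; the proofs are below) =====
def Claim_equal_pick_prefill_call : Prop := ∀ (calls : List (Int × String × Int)) (n_slots : Int), Dom_pick_prefill_call calls n_slots → Pre_pick_prefill_call calls n_slots → Spec_pick_prefill_call calls n_slots (pick_prefill_call calls n_slots)

-- ===== LEMMAS AND PROOFS =====

-- the running-minimum update used by both B's trackers and PySem.List.min?
def pvUpd (s : Option (Int × String × Int)) (x : Int × String × Int) : Option (Int × String × Int) :=
  match s with
  | none => some x
  | some m => if x.1 < m.1 then some x else some m

-- B's paired fold splits into two independent filtered folds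
theorem pv_fold_split (P Q : (Int × String × Int) → Bool) (calls : List (Int × String × Int))
    (s₁ s₂ : Option (Int × String × Int)) :
    calls.foldl (fun s x => if P x then (pvUpd s.1 x, if Q x then pvUpd s.2 x else s.2) else s) (s₁, s₂)
      = ((calls.filter P).foldl pvUpd s₁, ((calls.filter (fun x => P x && Q x)).foldl pvUpd s₂)) := by
  induction calls generalizing s₁ s₂ with
  | nil => rfl
  | cons h t ih =>
    by_cases hP : P h = true <;> by_cases hQ : Q h = true <;>
      simp [hP, hQ, ih]

-- a filtered fold of pvUpd is min? of the filtered list (definitional)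
theorem pv_fold_min (l : List (Int × String × Int)) :
    l.foldl pvUpd none = PySem.List.min? l (fun x => x.1) := by
  simp only [PySem.List.min?]
  congr 1
  funext s x
  cases s <;> rfl

-- head of the stable insertion sort = first minimal element (both satisfy the same
-- right-append recursion)
theorem pv_sorted_head_min (l : List (Int × String × Int)) :
    PySem.List.pyGet? (PySem.List.sorted l (fun x => x.1) false) 0
      = PySem.List.min? l (fun x => x.1) := by
  induction l using List.reverseRecOn with
  | nil => rfl
  | append_singleton t x ih =>
    rw [PySem.List.sorted_eq_foldl_insertBy, List.foldl_append,
        ← PySem.List.sorted_eq_foldl_insertBy]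
    have hmin : PySem.List.min? (t ++ [x]) (fun y => y.1)
        = pvUpd (PySem.List.min? t (fun y => y.1)) x := by
      simp only [PySem.List.min?, List.foldl_append, List.foldl_cons, List.foldl_nil]
      cases List.foldl _ none t <;> rfl
    rw [hmin, ← ih]
    cases hs : PySem.List.sorted t (fun y => y.1) false with
    | nil => simp [PySem.List.insertBy, pvUpd, show PySem.List.pyGet? ([] : List (Int × String × Int)) 0 = none from rfl]
    | cons m rest =>
      by_cases hlt : x.1 < m.1 <;>
        simp [PySem.List.insertBy, hlt, pvUpd]

-- ===== VERDICT (by name: the statement is the Claim_ definition above) =====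
theorem pick_prefill_call_spec : Claim_equal_pick_prefill_call := by
  intro calls n_slots _ _
  unfold Spec_pick_prefill_call pick_prefill_call pick_prefill_call_alt
  have hfun : (fun (s : Option (Int × String × Int) × Option (Int × String × Int)) x =>
      if PySem.Int.mod x.2.2 n_slots == 0 && decide (n_slots < x.2.2) then
        (match s.1 with
         | none => some x
         | some m => if x.1 < m.1 then some x else some m,
         if !is_pow2 x.2.2 then
           match s.2 with
           | none => some x
           | some m => if x.1 < m.1 then some x else some m
         else s.2)
      else s)
      = (fun (s : Option (Int × String × Int) × Option (Int × String × Int)) x =>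
          if (fun x => PySem.Int.mod x.2.2 n_slots == 0 && decide (n_slots < x.2.2)) x then
            (pvUpd s.1 x, if (fun x => !is_pow2 x.2.2) x then pvUpd s.2 x else s.2)
          else s) := rfl
  rw [hfun, pv_fold_split
    (fun x => PySem.Int.mod x.2.2 n_slots == 0 && decide (n_slots < x.2.2))
    (fun x => !is_pow2 x.2.2) calls none none]
  simp only [pv_fold_min]
  set P : (Int × String × Int) → Bool := fun x => PySem.Int.mod x.2.2 n_slots == 0 && decide (n_slots < x.2.2)
  set cands := calls.filter P with hcands
  have hff : calls.filter (fun x => P x && !is_pow2 x.2.2) = cands.filter (fun x => !is_pow2 x.2.2) := by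
    rw [hcands, List.filter_filter]
    congr 1
    funext x
    rw [Bool.and_comm]
  rw [hff]
  by_cases hc : cands = []
  · simp [hc, PySem.List.min?]
  · simp only [hc, if_false]
    by_cases hn : cands.filter (fun x => !is_pow2 x.2.2) = []
    · rw [hn]
      have : PySem.List.min? ([] : List (Int × String × Int)) (fun x => x.1) = none := rfl
      rw [this, pv_sorted_head_min]
      simp
    · rw [if_neg hn, pv_sorted_head_min]
      rcases hm : PySem.List.min? (cands.filter (fun x => !is_pow2 x.2.2)) (fun x => x.1) with _ | v
      · exact absurd (((PySem.List.min?_eq_none_iff _ _).mp hm)) hn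
      · rw [hm]
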